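-- pv_equiv track=rewrite | github.com/KuvaKodes/AI-1-and-2 | Unit 1 Searches/2 Vardhan Kushaan Peg_Solitaire_DFS.py | BFS
-- ===== SOURCE A (Python) =====
-- from collections import deque
--
-- goal_state = "x.............."
--
-- all_moves = [(0,1,3), (0,2,5), (1, 3, 6), (1, 4, 8), (2, 4, 7), (2, 5, 9), (3, 4, 5), (3, 6, 10), (3, 7, 12), (4, 7, 11), (4,8,13), (5, 8, 12), (5, 9, 14), (6, 7, 8), (7, 8, 9), (10, 11, 12), (11, 12, 13), (12, 13, 14)]
--
-- def swap(original, first, second, removal):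
--     lst_of_characters = list(original)
--     lst_of_characters[int(first)], lst_of_characters[int(second)] = lst_of_characters[int(second)], lst_of_characters[int(first)]
--     lst_of_characters[removal] = "."
--     return "".join(lst_of_characters)
--
-- def get_children(state):
--     children = list()
--     for x in all_moves:
--         if state[x[0]] == "x" and state[x[1]] == "x" and state[x[2]] == ".":
--             children.append(swap(state, x[0], x[2],x[1]))
--         if state[x[2]] == "x" and state[x[1]] == "x" and state[x[0]] == ".":
--             children.append(swap(state, x[0], x[2],x[1]))
--     return children
--
-- def BFS(start):
--     fringe = deque()
--     visited = set()
--     paren_dict = dict()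
--     fringe.append(start)
--     visited.add(start)
--     paren_dict[start] = None
--     while fringe:
--         temp = fringe.popleft()
--         if temp == goal_state:
--             lst_of_moves = list()
--             g = temp
--             lst_of_moves.append(g)
--             while paren_dict[g] is not None:
--                 g = paren_dict[g]
--                 lst_of_moves.append(g)
--             return (lst_of_moves, len(lst_of_moves))
--         for child in get_children(temp):
--             if child not in visited:
--                 fringe.append(child)
--                 visited.add(child)
--                 paren_dict[child] = temp
--     return (list(), None)
-- ===== SOURCE B (Python) =====
-- from collections import deque
--
-- goal_state = "x.............."
--
-- all_moves = [(0,1,3), (0,2,5), (1, 3, 6), (1, 4, 8), (2, 4, 7), (2, 5, 9), (3, 4, 5), (3, 6, 10), (3, 7, 12), (4, 7, 11), (4,8,13), (5, 8, 12), (5, 9, 14), (6, 7, 8), (7, 8, 9), (10, 11, 12), (11, 12, 13), (12, 13, 14)]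
--
-- def swap(original, first, second, removal):
--     lst_of_characters = list(original)
--     lst_of_characters[int(first)], lst_of_characters[int(second)] = lst_of_characters[int(second)], lst_of_characters[int(first)]
--     lst_of_characters[removal] = "."
--     return "".join(lst_of_characters)
--
-- def get_children(state):
--     children = list()
--     for x in all_moves:
--         if state[x[0]] == "x" and state[x[1]] == "x" and state[x[2]] == ".":
--             children.append(swap(state, x[0], x[2],x[1]))
--         if state[x[2]] == "x" and state[x[1]] == "x" and state[x[0]] == ".":
--             children.append(swap(state, x[0], x[2],x[1]))
--     return children
--
-- def BFS(start):
--     # Same BFS tree as the original, but each frontier entry carries its own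
--     # path back to the start, so no parent dictionary and no reconstruction loop.
--     fringe = deque()
--     visited = set()
--     fringe.append((start, []))
--     visited.add(start)
--     while fringe:
--         temp, path = fringe.popleft()
--         if temp == goal_state:
--             lst_of_moves = [temp] + path
--             return (lst_of_moves, len(lst_of_moves))
--         for child in get_children(temp):
--             if child not in visited:
--                 fringe.append((child, [temp] + path))
--                 visited.add(child)
--     return (list(), None)
-- ===== Notes on version B (the rewrite author's own statement) =====
-- stated objective: simpler
-- what changed: Same BFS over the same tree, but each frontier entry carries its own path back to the start, so the parent dictionary and the whole backwards reconstruction loop disappear.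
import Mathlib
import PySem

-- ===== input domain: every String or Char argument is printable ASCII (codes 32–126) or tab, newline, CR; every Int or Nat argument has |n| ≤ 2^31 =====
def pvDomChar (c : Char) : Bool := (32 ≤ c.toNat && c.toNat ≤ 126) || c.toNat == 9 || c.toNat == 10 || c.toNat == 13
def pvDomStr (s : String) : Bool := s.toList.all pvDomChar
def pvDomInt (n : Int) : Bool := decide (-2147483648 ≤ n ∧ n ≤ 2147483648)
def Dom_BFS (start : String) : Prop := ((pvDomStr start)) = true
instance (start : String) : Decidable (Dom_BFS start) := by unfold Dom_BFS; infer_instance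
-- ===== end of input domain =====

-- B drops A's parent dictionary and reconstruction loop: each frontier entry carries its
-- own path back to the start (objective: simpler). Return-value equivalence is proved on
-- all inputs; Pre_ only excludes inputs where the Python A raises IndexError.

-- ===== PORT A =====
-- shared module context (identical in Source A and Source B)
def goalState : String := "x.............."

def allMoves : List (Int × Int × Int) :=
  [(0,1,3), (0,2,5), (1, 3, 6), (1, 4, 8), (2, 4, 7), (2, 5, 9), (3, 4, 5), (3, 6, 10),
   (3, 7, 12), (4, 7, 11), (4,8,13), (5, 8, 12), (5, 9, 14), (6, 7, 8), (7, 8, 9),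
   (10, 11, 12), (11, 12, 13), (12, 13, 14)]

-- swap(original, first, second, removal); list indexing is in range whenever BFS calls it
-- (Pre_ excludes the inputs where the Python raises), so the total pyGet?/pySetD forms are exact there
def swapP (original : String) (first second removal : Int) : String :=
  let cs := original.toList
  let a := (PySem.List.pyGet? cs first).getD ' '
  let b := (PySem.List.pyGet? cs second).getD ' '
  let cs := PySem.List.pySetD cs first b
  let cs := PySem.List.pySetD cs second a
  let cs := PySem.List.pySetD cs removal '.'
  String.ofList cs

-- get_children(state); state[i] ported as pyGet? with default ' ' (out of range = Python's
-- IndexError, reached only outside Pre_)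
def getChildrenP (state : String) : List String :=
  allMoves.foldl (fun children x =>
    let c0 := (PySem.Str.pyGet? state x.1).getD ' '
    let c1 := (PySem.Str.pyGet? state x.2.1).getD ' '
    let c2 := (PySem.Str.pyGet? state x.2.2).getD ' '
    let children := if c0 = 'x' ∧ c1 = 'x' ∧ c2 = '.' then
        children ++ [swapP state x.1 x.2.2 x.2.1] else children
    if c2 = 'x' ∧ c1 = 'x' ∧ c0 = '.' then
        children ++ [swapP state x.1 x.2.2 x.2.1] else children) []

-- the inner 'while paren_dict[g] is not None' loop, with fuel (the chain is finite on every
-- actual run: its length is below the dict size, see chainTo_buildPathA below);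
-- paren_dict[g] ported as getD g none (g is always a key on actual runs)
def buildPathA (d : PySem.Dict String (Option String)) : Nat → String → List String → List String
  | 0, _, acc => acc
  | f+1, g, acc =>
    match d.getD g none with
    | some p => buildPathA d f p (acc ++ [p])
    | none => acc

-- body of 'for child in get_children(temp)'
def stepA (temp : String) (st : List String × PySem.Set String × PySem.Dict String (Option String))
    (child : String) : List String × PySem.Set String × PySem.Dict String (Option String) :=
  let (fr, vis, d) := st
  if PySem.Set.contains vis child then st
  else (fr ++ [child], PySem.Set.add vis child, d.insert child (some temp))

-- the 'while fringe' loop, with fuel (a totality guard only: iterations are bounded by the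
-- number of distinct states, below pvFuel)
def loopA : Nat → List String → PySem.Set String → PySem.Dict String (Option String) →
    List String × Option Int
  | 0, _, _, _ => ([], none)
  | _+1, [], _, _ => ([], none)
  | f+1, temp :: rest, vis, d =>
    if temp = goalState then
      let lst := buildPathA d (d.size + 1) temp [temp]
      (lst, some (lst.length : Int))
    else
      let (fr', vis', d') := (getChildrenP temp).foldl (stepA temp) (rest, vis, d)
      loopA f fr' vis' d'

def pvFuel (start : String) : Nat := 128 ^ start.toList.length + 1

def BFS (start : String) : List String × Option Int :=
  loopA (pvFuel start) [start] (PySem.Set.add PySem.Set.empty start)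
    ((PySem.Dict.empty).insert start none)

-- ===== PORT B =====
-- body of 'for child in get_children(temp)': each enqueued child carries its path
def stepB (temp : String) (p : List String)
    (st : List (String × List String) × PySem.Set String) (child : String) :
    List (String × List String) × PySem.Set String :=
  let (fr, vis) := st
  if PySem.Set.contains vis child then st
  else (fr ++ [(child, temp :: p)], PySem.Set.add vis child)

def loopB : Nat → List (String × List String) → PySem.Set String → List String × Option Int
  | 0, _, _ => ([], none)
  | _+1, [], _ => ([], none)
  | f+1, (temp, p) :: rest, vis =>
    if temp = goalState then (temp :: p, some ((temp :: p).length : Int))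
    else
      let (fr', vis') := (getChildrenP temp).foldl (stepB temp p) (rest, vis)
      loopB f fr' vis'

def BFS_alt (start : String) : List String × Option Int :=
  loopB (pvFuel start) [(start, [])] (PySem.Set.add PySem.Set.empty start)

-- ===== PRECONDITION & SPEC =====
-- Pre_ excludes exactly the inputs on which the Python A raises IndexError in get_children:
-- any start other than the goal state with fewer than 15 characters.
def Pre_BFS (start : String) : Prop := start = "x.............." ∨ 15 ≤ start.toList.length
instance (start : String) : Decidable (Pre_BFS start) := by unfold Pre_BFS; infer_instance

def pvWitness_BFS : String := ".xxxxxxxxxxxxxx"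

def Spec_BFS (start : String) (out : List String × Option Int) : Prop := out = BFS_alt start
instance (start : String) (out : List String × Option Int) : Decidable (Spec_BFS start out) := by
  unfold Spec_BFS; infer_instance

-- ===== CLAIM (what is proved, stated in full; the proofs are below) =====
def Claim_equal_BFS : Prop := ∀ (start : String), Dom_BFS start → Pre_BFS start → Spec_BFS start (BFS start)

-- ===== LEMMAS AND PROOFS =====

-- the parent chain that A's reconstruction walk follows, as a relation on the dict
inductive ChainTo (d : PySem.Dict String (Option String)) : String → List String → Prop
  | nil {s : String} : d.get? s = some none → ChainTo d s []
  | cons {s t : String} {p : List String} :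
      d.get? s = some (some t) → ChainTo d t p → ChainTo d s (t :: p)

theorem chainTo_contains {d : PySem.Dict String (Option String)} {s : String}
    {p : List String} (h : ChainTo d s p) : d.contains s = true := by
  cases h with
  | nil h => rw [PySem.Dict.contains_eq_isSome_get?, h]; rfl
  | cons h _ => rw [PySem.Dict.contains_eq_isSome_get?, h]; rfl

theorem chainTo_buildPathA {d : PySem.Dict String (Option String)} {g : String}
    {p : List String} (h : ChainTo d g p) :
    ∀ f acc, p.length < f → buildPathA d f g acc = acc ++ p := by
  induction h with
  | nil h =>
    intro f acc hf
    match f, hf with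
    | f+1, _ => simp [buildPathA, PySem.Dict.getD_of_get?_eq_some _ none h]
  | cons h _ ih =>
    intro f acc hf
    match f, hf with
    | f+1, hf =>
      simp only [buildPathA, PySem.Dict.getD_of_get?_eq_some _ none h]
      rw [ih f (acc ++ [_]) (by simpa using Nat.lt_of_succ_lt_succ hf)]
      simp

theorem chainTo_insert {d : PySem.Dict String (Option String)} {s c : String}
    {p : List String} (hc : d.contains c = false) (v : Option String)
    (h : ChainTo d s p) : ChainTo (d.insert c v) s p := by
  induction h with
  | @nil s h =>
    have hne : s ≠ c := by
      intro he
      have hcon := chainTo_contains (ChainTo.nil h)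
      rw [he, hc] at hcon; cases hcon
    exact ChainTo.nil (by rw [PySem.Dict.get?_insert_of_ne d v hne, h])
  | @cons s t q h hch ih =>
    have hne : s ≠ c := by
      intro he
      have hcon := chainTo_contains (ChainTo.cons h hch)
      rw [he, hc] at hcon; cases hcon
    exact ChainTo.cons (by rw [PySem.Dict.get?_insert_of_ne d v hne, h]) ih

-- the simulation invariant between A's loop state and B's loop state
def BFSInv (frB : List (String × List String)) (vis : PySem.Set String)
    (d : PySem.Dict String (Option String)) : Prop :=
  d.keys = vis ∧ ∀ s p, (s, p) ∈ frB → ChainTo d s p ∧ p.length + 1 ≤ vis.length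

theorem fold_inv (temp : String) (p : List String) :
    ∀ (children : List String) (restB : List (String × List String))
      (vis : PySem.Set String) (d : PySem.Dict String (Option String)),
      BFSInv restB vis d → ChainTo d temp p → p.length + 1 ≤ vis.length →
      (children.foldl (stepA temp) (restB.map Prod.fst, vis, d)).1
        = (children.foldl (stepB temp p) (restB, vis)).1.map Prod.fst ∧
      (children.foldl (stepA temp) (restB.map Prod.fst, vis, d)).2.1
        = (children.foldl (stepB temp p) (restB, vis)).2 ∧
      BFSInv (children.foldl (stepB temp p) (restB, vis)).1
          (children.foldl (stepB temp p) (restB, vis)).2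
          (children.foldl (stepA temp) (restB.map Prod.fst, vis, d)).2.2 := by
  intro children
  induction children with
  | nil => intro restB vis d hinv hch hlen; exact ⟨rfl, rfl, hinv⟩
  | cons c cs ih =>
    intro restB vis d hinv hch hlen
    obtain ⟨hkeys, hfr⟩ := hinv
    by_cases hc : PySem.Set.contains vis c = true
    · simp only [List.foldl_cons, stepA, stepB, hc, if_true]
      exact ih restB vis d ⟨hkeys, hfr⟩ hch hlen
    · have hc' : PySem.Set.contains vis c = false := by
        cases h : PySem.Set.contains vis c
        · rfl
        · exact absurd h hc
      have hcm : c ∉ vis := by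
        intro hm
        exact hc ((PySem.Set.contains_iff vis c).mpr hm)
      have hcd : d.contains c = false := by
        cases hcon : d.contains c
        · rfl
        · exact absurd ((PySem.Dict.contains_iff_mem_keys d c).mp hcon) (hkeys ▸ hcm)
      have hadd : PySem.Set.add vis c = vis ++ [c] := PySem.Set.add_of_not_mem hcm
      simp only [List.foldl_cons, stepA, stepB, hc', if_false, Bool.false_eq_true]
      have hnewinv : BFSInv (restB ++ [(c, temp :: p)]) (PySem.Set.add vis c)
          (d.insert c (some temp)) := by
        constructor
        · rw [PySem.Dict.keys_insert_of_not_contains d _ hcd, hkeys, hadd]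
        · intro s q hmem
          rw [List.mem_append] at hmem
          rcases hmem with hmem | hmem
          · obtain ⟨hch', hlen'⟩ := hfr s q hmem
            refine ⟨chainTo_insert hcd _ hch', ?_⟩
            rw [hadd]; simp only [List.length_append, List.length_cons, List.length_nil]
            omega
          · simp only [List.mem_singleton, Prod.mk.injEq] at hmem
            obtain ⟨rfl, rfl⟩ := hmem
            refine ⟨ChainTo.cons (PySem.Dict.get?_insert_self d _ (some temp))
              (chainTo_insert hcd _ hch), ?_⟩
            rw [hadd]; simp only [List.length_append, List.length_cons, List.length_nil]
            omega
      have hrec := ih (restB ++ [(c, temp :: p)]) (PySem.Set.add vis c)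
        (d.insert c (some temp)) hnewinv (chainTo_insert hcd _ hch)
        (by rw [hadd]; simp only [List.length_append, List.length_cons, List.length_nil]; omega)
      simpa [List.map_append] using hrec

theorem dict_size_eq_vis {vis : PySem.Set String} {d : PySem.Dict String (Option String)}
    (h : d.keys = vis) : d.size = vis.length := by
  have hlen : d.keys.length = vis.length := by rw [h]
  simpa [PySem.Dict.keys, PySem.Dict.size] using hlen

theorem loop_eq : ∀ (f : Nat) (frB : List (String × List String)) (vis : PySem.Set String)
    (d : PySem.Dict String (Option String)), BFSInv frB vis d →
    loopA f (frB.map Prod.fst) vis d = loopB f frB vis := by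
  intro f
  induction f with
  | zero => intro frB vis d _; rfl
  | succ f ih =>
    intro frB vis d hinv
    match frB with
    | [] => rfl
    | (temp, p) :: rest =>
      obtain ⟨hkeys, hfr⟩ := hinv
      obtain ⟨hch, hlen⟩ := hfr temp p (by simp)
      simp only [List.map_cons, loopA, loopB]
      by_cases hg : temp = goalState
      · simp only [hg, if_true]
        have hlst : buildPathA d (d.size + 1) goalState [goalState] = goalState :: p := by
          rw [hg] at hch
          have hb := chainTo_buildPathA hch (d.size + 1) [goalState]
            (by rw [dict_size_eq_vis hkeys]; omega)
          simpa using hb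
        rw [hlst]
      · simp only [hg, if_false]
        have hrest : BFSInv rest vis d := ⟨hkeys, fun s q hm => hfr s q (by simp [hm])⟩
        obtain ⟨h1, h2, h3⟩ := fold_inv temp p (getChildrenP temp) rest vis d hrest hch hlen
        rcases hA : (getChildrenP temp).foldl (stepA temp) (rest.map Prod.fst, vis, d)
          with ⟨frA, visA, dA⟩
        rcases hB : (getChildrenP temp).foldl (stepB temp p) (rest, vis) with ⟨frB', visB⟩
        rw [hA, hB] at h1 h2 h3
        dsimp only at h1 h2 h3 ⊢
        rw [h1, h2]
        exact ih frB' visB dA h3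

-- ===== VERDICT (by name: the statement is the Claim_ definition above) =====
theorem BFS_spec : Claim_equal_BFS := by
  intro start _ _
  unfold Spec_BFS BFS BFS_alt
  have hvis : PySem.Set.add PySem.Set.empty start = [start] := rfl
  have hinv : BFSInv [(start, [])] (PySem.Set.add PySem.Set.empty start)
      ((PySem.Dict.empty).insert start none) := by
    constructor
    · rw [PySem.Dict.keys_insert_of_not_contains _ _ (PySem.Dict.contains_empty start), hvis]
      rfl
    · intro s q hm
      simp only [List.mem_singleton, Prod.mk.injEq] at hm
      obtain ⟨rfl, rfl⟩ := hm
      exact ⟨ChainTo.nil (PySem.Dict.get?_insert_self _ _ none), by rw [hvis]; simp⟩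
  have hmain := loop_eq (pvFuel start) [(start, [])] (PySem.Set.add PySem.Set.empty start)
    ((PySem.Dict.empty).insert start none) hinv
  simpa using hmain
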